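-- pv_equiv track=rewrite | github.com/dschulmeist/slide2anki | packages/core/slide2anki_core/graph/holistic/extract_document.py | _dedupe_markdown_sections
-- ===== SOURCE A (Python) =====
-- def _dedupe_markdown_sections(markdown: str) -> str:
--     """Remove duplicate sections from merged markdown.
--
--     Simple deduplication based on exact header+content matching.
--     More sophisticated approaches could use fuzzy matching.
--
--     Args:
--         markdown: Merged markdown content
--
--     Returns:
--         Deduplicated markdown
--     """
--     lines = markdown.split("\n")
--     seen_sections: set[str] = set()
--     result_lines: list[str] = []
--     current_section: list[str] = []
--     current_header = ""
--
--     for line in lines: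
--         if line.startswith("##"):
--             # New section - flush previous
--             if current_section:
--                 section_key = current_header + "".join(current_section[:3])
--                 if section_key not in seen_sections:
--                     result_lines.extend(current_section)
--                     seen_sections.add(section_key)
--                 current_section = []
--
--             current_header = line
--             current_section.append(line)
--         else:
--             current_section.append(line)
--
--     # Flush last section
--     if current_section:
--         section_key = current_header + "".join(current_section[:3])
--         if section_key not in seen_sections:
--             result_lines.extend(current_section)
--
--     return "\n".join(result_lines)
-- ===== SOURCE B (Python) =====
-- def _dedupe_markdown_sections(markdown: str) -> str:
--     """Remove duplicate sections (header+first-3-lines key), via partition-then-filter."""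
--     # Pass 1: partition lines into (header, section_lines) groups.
--     groups: list[tuple[str, list[str]]] = []
--     for line in markdown.split("\n"):
--         if line.startswith("##"):
--             groups.append((line, [line]))
--         elif groups:
--             groups[-1][1].append(line)
--         else:
--             groups.append(("", [line]))
--     # Pass 2: keep each group whose key has not been seen yet.
--     seen: set[str] = set()
--     kept: list[str] = []
--     for header, section in groups:
--         key = header + "".join(section[:3])
--         if key not in seen:
--             seen.add(key)
--             kept.extend(section)
--     return "\n".join(kept)
-- ===== Notes on version B (the rewrite author's own statement) =====
-- stated objective: alternative
-- what changed: Replaces A's single stateful loop (current-section buffer, header variable, inline flushes at section starts plus a duplicated final flush) with two independent passes: one that partitions the lines into (header, section) groups and one that filters the groups by their seen keys.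
import Mathlib
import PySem

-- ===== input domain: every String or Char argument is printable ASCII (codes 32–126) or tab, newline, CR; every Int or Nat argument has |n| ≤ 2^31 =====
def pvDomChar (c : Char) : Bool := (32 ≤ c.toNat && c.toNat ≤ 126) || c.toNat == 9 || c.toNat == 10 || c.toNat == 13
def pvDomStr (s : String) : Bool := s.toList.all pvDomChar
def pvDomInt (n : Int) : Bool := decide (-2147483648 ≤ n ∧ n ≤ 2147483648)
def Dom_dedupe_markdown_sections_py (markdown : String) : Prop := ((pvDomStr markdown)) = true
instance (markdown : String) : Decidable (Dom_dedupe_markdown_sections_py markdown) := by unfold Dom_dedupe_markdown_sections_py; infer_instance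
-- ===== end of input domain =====

-- B restructures A's single stateful loop as partition-into-groups then filter-by-key; same values, same cost (objective: alternative).

-- markdown.split("\n"); the separator is the non-empty literal "\n", so split? is always `some` and the [] default is unreachable
def pvSplitNL (s : String) : List String := (PySem.Str.split? s "\n").getD []

-- section_key = header + "".join(sect[:3])   (the key formula both programs share)
def pvKey (header : String) (sect : List String) : String :=
  header ++ PySem.Str.join "" (PySem.List.slice sect none (some 3))

-- ===== PORT A =====
-- loop state: (seen_sections, result_lines, current_section, current_header)
def pvStepA (st : PySem.Set String × List String × List String × String) (line : String) :
    PySem.Set String × List String × List String × String :=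
  let (seen, result, cur, header) := st
  if PySem.Str.startswith line "##" then
    if cur ≠ [] then
      -- new section: flush previous
      if PySem.Set.contains seen (pvKey header cur) then
        (seen, result, [line], line)
      else
        (PySem.Set.add seen (pvKey header cur), result ++ cur, [line], line)
    else
      (seen, result, [line], line)
  else
    (seen, result, cur ++ [line], header)

-- the trailing "flush last section" (membership test only; no add, as in A)
def pvFinishA (st : PySem.Set String × List String × List String × String) : List String :=
  let (seen, result, cur, header) := st
  if cur ≠ [] then
    if PySem.Set.contains seen (pvKey header cur) then result else result ++ cur
  else result

def dedupe_markdown_sections_py (markdown : String) : String :=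
  let lines := pvSplitNL markdown
  PySem.Str.join "\n" (pvFinishA (lines.foldl pvStepA (PySem.Set.empty, [], [], "")))

-- ===== PORT B =====
-- groups[-1][1].append(line)
def pvAppendLast (gs : List (String × List String)) (line : String) : List (String × List String) :=
  match gs with
  | [] => []
  | [(h, s)] => [(h, s ++ [line])]
  | g :: rest => g :: pvAppendLast rest line

-- pass 1 body: partition lines into (header, section_lines) groups
def pvStepB (gs : List (String × List String)) (line : String) : List (String × List String) :=
  if PySem.Str.startswith line "##" then gs ++ [(line, [line])]
  else
    match gs with
    | [] => [("", [line])]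
    | _ :: _ => pvAppendLast gs line

-- pass 2 body: keep a group iff its key is new
def pvDedupStep (st : PySem.Set String × List String) (g : String × List String) :
    PySem.Set String × List String :=
  let (seen, kept) := st
  if PySem.Set.contains seen (pvKey g.1 g.2) then (seen, kept)
  else (PySem.Set.add seen (pvKey g.1 g.2), kept ++ g.2)

def dedupe_markdown_sections_py_alt (markdown : String) : String :=
  let groups := (pvSplitNL markdown).foldl pvStepB []
  PySem.Str.join "\n" (groups.foldl pvDedupStep (PySem.Set.empty, [])).2

-- ===== PRECONDITION & SPEC =====
def Spec_dedupe_markdown_sections_py (markdown : String) (out : String) : Prop := out = dedupe_markdown_sections_py_alt markdown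
instance (markdown : String) (out : String) : Decidable (Spec_dedupe_markdown_sections_py markdown out) := by unfold Spec_dedupe_markdown_sections_py; infer_instance

-- ===== CLAIM (what is proved, stated in full; the proofs are below) =====
def Claim_equal_dedupe_markdown_sections_py : Prop := ∀ (markdown : String), Dom_dedupe_markdown_sections_py markdown → Spec_dedupe_markdown_sections_py markdown (dedupe_markdown_sections_py markdown)

-- ===== LEMMAS AND PROOFS =====

-- reference grouping: the groups of `lines` when (header, cur) is the pending (possibly empty) group
def pvGroups (header : String) (cur : List String) : List String → List (String × List String)
  | [] => if cur = [] then [] else [(header, cur)]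
  | l :: rest =>
    if PySem.Str.startswith l "##" then
      (if cur = [] then [] else [(header, cur)]) ++ pvGroups l [l] rest
    else pvGroups header (cur ++ [l]) rest

theorem pvAppendLast_append (gs : List (String × List String)) (h : String) (s : List String)
    (line : String) : pvAppendLast (gs ++ [(h, s)]) line = gs ++ [(h, s ++ [line])] := by
  induction gs with
  | nil => rfl
  | cons g rest ih =>
    cases rest with
    | nil => rfl
    | cons g' rest' => simpa [pvAppendLast] using ih

theorem foldB_pending (lines : List String) :
    ∀ (gsDone : List (String × List String)) (h : String) (cur : List String), cur ≠ [] →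
      List.foldl pvStepB (gsDone ++ [(h, cur)]) lines = gsDone ++ pvGroups h cur lines := by
  induction lines with
  | nil => intro gsDone h cur hc; simp [pvGroups, hc]
  | cons l rest ih =>
    intro gsDone h cur hc
    by_cases hs : PySem.Chars.startswith l.toList ['#', '#'] = true
    · have step : pvStepB (gsDone ++ [(h, cur)]) l = (gsDone ++ [(h, cur)]) ++ [(l, [l])] := by
        simp [pvStepB, hs]
      rw [List.foldl_cons, step, ih (gsDone ++ [(h, cur)]) l [l] (by simp)]
      simp [pvGroups, hs, hc]
    · have step : pvStepB (gsDone ++ [(h, cur)]) l = gsDone ++ [(h, cur ++ [l])] := by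
        cases gsDone with
        | nil =>
          cases cur with
          | nil => exact absurd rfl hc
          | cons c cs => simpa [pvStepB, hs] using pvAppendLast_append [] h (c :: cs) l
        | cons g gs => simpa [pvStepB, hs] using pvAppendLast_append (g :: gs) h cur l
      rw [List.foldl_cons, step, ih gsDone h (cur ++ [l]) (by simp)]
      simp [pvGroups, hs]

theorem foldB_eq_groups (lines : List String) :
    List.foldl pvStepB [] lines = pvGroups "" [] lines := by
  cases lines with
  | nil => rfl
  | cons l rest =>
    by_cases hs : PySem.Chars.startswith l.toList ['#', '#'] = true
    · have step : pvStepB ([] : List (String × List String)) l = [] ++ [(l, [l])] := by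
        simp [pvStepB, hs]
      rw [List.foldl_cons, step, foldB_pending rest [] l [l] (by simp)]
      simp [pvGroups, hs]
    · have step : pvStepB ([] : List (String × List String)) l = [] ++ [("", [l])] := by
        simp [pvStepB, hs]
      rw [List.foldl_cons, step, foldB_pending rest [] "" [l] (by simp)]
      simp [pvGroups, hs]

theorem foldA_eq_dedup_groups (lines : List String) :
    ∀ (seen : PySem.Set String) (result cur : List String) (header : String),
      pvFinishA (List.foldl pvStepA (seen, result, cur, header) lines)
        = (List.foldl pvDedupStep (seen, result) (pvGroups header cur lines)).2 := by
  induction lines with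
  | nil =>
    intro seen result cur header
    cases cur with
    | nil => simp [pvGroups, pvFinishA]
    | cons c cs =>
      by_cases hk : pvKey header (c :: cs) ∈ seen <;>
        simp [pvGroups, pvFinishA, pvDedupStep, hk]
  | cons l rest ih =>
    intro seen result cur header
    by_cases hs : PySem.Chars.startswith l.toList ['#', '#'] = true
    · cases cur with
      | nil =>
        have step : pvStepA (seen, result, [], header) l = (seen, result, [l], l) := by
          simp [pvStepA, hs]
        rw [List.foldl_cons, step, ih]
        simp [pvGroups, hs]
      | cons c cs =>
        by_cases hk : pvKey header (c :: cs) ∈ seen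
        · have step : pvStepA (seen, result, c :: cs, header) l = (seen, result, [l], l) := by
            simp [pvStepA, hs, hk]
          rw [List.foldl_cons, step, ih]
          simp [pvGroups, hs, pvDedupStep, hk]
        · have step : pvStepA (seen, result, c :: cs, header) l
              = (PySem.Set.add seen (pvKey header (c :: cs)), result ++ c :: cs, [l], l) := by
            simp [pvStepA, hs, hk]
          rw [List.foldl_cons, step, ih]
          simp [pvGroups, hs, pvDedupStep, hk]
    · have step : pvStepA (seen, result, cur, header) l = (seen, result, cur ++ [l], header) := by
        simp [pvStepA, hs]
      rw [List.foldl_cons, step, ih]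
      simp [pvGroups, hs]

-- ===== VERDICT (by name: the statement is the Claim_ definition above) =====
theorem dedupe_markdown_sections_py_spec : Claim_equal_dedupe_markdown_sections_py := by
  intro markdown _
  show dedupe_markdown_sections_py markdown = dedupe_markdown_sections_py_alt markdown
  unfold dedupe_markdown_sections_py dedupe_markdown_sections_py_alt
  simp only [foldB_eq_groups, foldA_eq_dedup_groups]
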